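-- pv_equiv track=rewrite | github.com/Bharadwaz-Bairu/Bharadwaz-Bairu | codeSignal/aircade/intro/level-3/CommonCharacterCount.py | solution
-- ===== SOURCE A (Python) =====
-- def solution(s1, s2):
--     characters = ['a','b','c','d','e','f','g','h','i','j','k','l','m','n','o','p','q','r','s','t','u','v','w','x','y','z']
--     ans1 = {}
--     ans2 = {}
--     for i in s1:
--         if i in ans1.keys():
--             ans1[i]+=1
--         else :
--             ans1[i]=1
--     for i in s2:
--         if i in ans2.keys():
--             ans2[i]+=1
--         else:
--             ans2[i]=1
--     ans = 0
--     for item in ans1.keys():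
--         if item in ans2.keys() :
--             ans += min(ans1[item],ans2[item])
--     return ans
-- ===== SOURCE B (Python) =====
-- def solution(s1, s2):
--     count = {}
--     for c in s1:
--         count[c] = count.get(c, 0) + 1
--     ans = 0
--     for c in s2:
--         if count.get(c, 0) > 0:
--             count[c] -= 1
--             ans += 1
--     return ans
-- ===== Notes on version B (the rewrite author's own statement) =====
-- stated objective: alternative
-- what changed: B builds a single consumable counter from s1 and streams s2 through it, decrementing and counting matches, instead of building two full frequency dicts and a third min-taking intersection pass over the keys.
import Mathlib
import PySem

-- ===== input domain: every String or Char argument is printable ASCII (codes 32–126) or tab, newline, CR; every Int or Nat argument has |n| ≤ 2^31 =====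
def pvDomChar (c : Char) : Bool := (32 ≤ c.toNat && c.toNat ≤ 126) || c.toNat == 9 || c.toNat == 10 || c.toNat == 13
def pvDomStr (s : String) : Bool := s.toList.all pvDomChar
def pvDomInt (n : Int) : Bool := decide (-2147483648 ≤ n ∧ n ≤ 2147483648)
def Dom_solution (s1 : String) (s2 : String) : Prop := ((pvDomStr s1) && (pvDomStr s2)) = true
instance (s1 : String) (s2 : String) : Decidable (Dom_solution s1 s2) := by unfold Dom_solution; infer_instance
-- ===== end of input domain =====

-- B replaces A's two frequency dicts and min-intersection pass by one consumable
-- counter built from s1 that s2 is streamed through (objective: alternative decomposition).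

-- ===== PORT A =====
-- A's unused local list `characters` is dead code and is omitted.
def solution (s1 : String) (s2 : String) : Int :=
  let ans1 := s1.toList.foldl
    (fun d i => if d.contains i then d.insert i (d.getD i 0 + 1) else d.insert i (1 : Int))
    PySem.Dict.empty
  let ans2 := s2.toList.foldl
    (fun d i => if d.contains i then d.insert i (d.getD i 0 + 1) else d.insert i (1 : Int))
    PySem.Dict.empty
  -- `ans1[item]` / `ans2[item]`: both keys are present here, so the lookups equal getD _ 0
  ans1.keys.foldl
    (fun ans item => if ans2.contains item then ans + min (ans1.getD item 0) (ans2.getD item 0) else ans)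
    0

-- ===== PORT B =====
def solution_alt (s1 : String) (s2 : String) : Int :=
  let count := s1.toList.foldl (fun d c => d.insert c (d.getD c 0 + 1))
    (PySem.Dict.empty : PySem.Dict Char Int)
  -- `count[c] -= 1`: c is present here (its count is > 0), so the lookup equals getD _ 0
  (s2.toList.foldl
    (fun s c => if s.1.getD c 0 > 0 then (s.1.insert c (s.1.getD c 0 - 1), s.2 + 1) else s)
    (count, (0 : Int))).2

-- ===== PRECONDITION & SPEC =====
def Spec_solution (s1 : String) (s2 : String) (out : Int) : Prop := out = solution_alt s1 s2
instance (s1 : String) (s2 : String) (out : Int) : Decidable (Spec_solution s1 s2 out) := by unfold Spec_solution; infer_instance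

-- ===== CLAIM (what is proved, stated in full; the proofs are below) =====
def Claim_equal_solution : Prop := ∀ (s1 : String) (s2 : String), Dom_solution s1 s2 → Spec_solution s1 s2 (solution s1 s2)

-- ===== LEMMAS AND PROOFS =====

-- the common value both programs compute: sum over a finite key set of the min of the two counts
def pvF (l1 l2 : List Char) (x : Char) : Int := min (l1.count x : Int) (l2.count x : Int)

-- pvF vanishes off the support of either list
lemma pvF_eq_zero_left (l1 l2 : List Char) (x : Char) (h : x ∉ l1) : pvF l1 l2 x = 0 := by
  have h0 : l1.count x = 0 := List.count_eq_zero_of_not_mem h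
  simp [pvF, h0]

lemma pvF_eq_zero_right (l1 l2 : List Char) (x : Char) (h : x ∉ l2) : pvF l1 l2 x = 0 := by
  have h0 : l2.count x = 0 := List.count_eq_zero_of_not_mem h
  simp [pvF, h0]

-- both character-counting loops build collections.Counter
lemma pvBuildA (l : List Char) :
    l.foldl (fun d i => if d.contains i then d.insert i (d.getD i 0 + 1) else d.insert i (1 : Int))
      PySem.Dict.empty = PySem.Dict.counter l := by
  rw [← PySem.Dict.foldl_insert_getD_add_one_eq_counter]
  apply PySem.List.foldl_congr_mem
  intro d x _
  by_cases h : d.contains x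
  · rw [if_pos h]
  · rw [if_neg h, PySem.Dict.getD_of_not_contains d 0 (by simpa using h), zero_add]

-- sums over the two key sets (and over the union) all agree, since pvF vanishes off either support
lemma pvSum_shift (l1 l2 : List Char) :
    ∑ x ∈ l1.toFinset, pvF l1 l2 x = ∑ x ∈ l2.toFinset, pvF l1 l2 x := by
  have hbig : ∀ (S : Finset Char), S ⊆ (l1 ++ l2).toFinset →
      (∀ x ∈ (l1 ++ l2).toFinset, x ∉ S → pvF l1 l2 x = 0) →
      ∑ x ∈ S, pvF l1 l2 x = ∑ x ∈ (l1 ++ l2).toFinset, pvF l1 l2 x :=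
    fun S h1 h2 => Finset.sum_subset h1 h2
  rw [hbig l1.toFinset, hbig l2.toFinset]
  · rw [List.toFinset_append]; exact Finset.subset_union_right
  · intro x _ hx
    exact pvF_eq_zero_right l1 l2 x (by simpa using hx)
  · rw [List.toFinset_append]; exact Finset.subset_union_left
  · intro x _ hx
    exact pvF_eq_zero_left l1 l2 x (by simpa using hx)

-- A's final pass over ans1.keys computes the sum of pvF over s1's distinct characters
lemma pvA_eq (l1 l2 : List Char) :
    (PySem.Set.ofList l1).foldl
      (fun ans item => if (PySem.Dict.counter l2).contains item then
          ans + min ((PySem.Dict.counter l1).getD item 0) ((PySem.Dict.counter l2).getD item 0)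
        else ans) 0
      = ∑ x ∈ l1.toFinset, pvF l1 l2 x := by
  have hstep : (PySem.Set.ofList l1).foldl
      (fun ans item => if (PySem.Dict.counter l2).contains item then
          ans + min ((PySem.Dict.counter l1).getD item 0) ((PySem.Dict.counter l2).getD item 0)
        else ans) 0
      = (PySem.Set.ofList l1).foldl (fun ans item => ans + pvF l1 l2 item) 0 := by
    apply PySem.List.foldl_congr_mem
    intro acc x hx
    rw [PySem.Dict.contains_counter, PySem.Dict.getD_counter, PySem.Dict.getD_counter]
    by_cases h : l2.contains x
    · rw [if_pos h]; rfl
    · rw [if_neg h, pvF_eq_zero_right l1 l2 x (fun hm => h (List.contains_iff_mem.mpr hm)),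
        add_zero]
  rw [hstep, PySem.List.foldl_add, zero_add,
    ← List.sum_toFinset (pvF l1 l2) (PySem.Set.nodup_ofList l1)]
  congr 1
  ext x
  simp [PySem.Set.mem_ofList]

-- B's streaming loop: matched characters = sum of min(remaining budget, demand)
lemma pvB_loop (Sf : Finset Char) (l2 : List Char) :
    ∀ (d : PySem.Dict Char Int) (ans : Int),
    (∀ x ∈ l2, x ∈ Sf) → (∀ x, 0 ≤ d.getD x 0) →
    (l2.foldl
      (fun s c => if s.1.getD c 0 > 0 then (s.1.insert c (s.1.getD c 0 - 1), s.2 + 1) else s)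
      (d, ans)).2
      = ans + ∑ x ∈ Sf, min (d.getD x 0) (l2.count x : Int) := by
  induction l2 with
  | nil =>
    intro d ans _ hpos
    simp only [List.foldl_nil, List.count_nil]
    have : ∑ x ∈ Sf, min (d.getD x 0) ((0:Nat) : Int) = 0 :=
      Finset.sum_eq_zero (fun x _ => by have := hpos x; omega)
    rw [this, add_zero]
  | cons c t ih =>
    intro d ans hsub hpos
    have hc : c ∈ Sf := hsub c (List.mem_cons_self)
    simp only [List.foldl_cons]
    by_cases h : d.getD c 0 > 0
    · rw [if_pos h]
      rw [ih (d.insert c (d.getD c 0 - 1)) (ans + 1)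
        (fun x hx => hsub x (List.mem_cons_of_mem c hx))
        (fun x => by rw [PySem.Dict.getD_insert]; split_ifs with hxc
                     · omega
                     · exact hpos x)]
      have hsum : ∑ x ∈ Sf, min (d.getD x 0) ((c :: t).count x : Int)
          = (∑ x ∈ Sf, min ((d.insert c (d.getD c 0 - 1)).getD x 0) (t.count x : Int))
            + ∑ x ∈ Sf, (if x = c then (1:Int) else 0) := by
        rw [← Finset.sum_add_distrib]
        apply Finset.sum_congr rfl
        intro x _
        rw [PySem.Dict.getD_insert]
        by_cases hxc : x = c
        · subst hxc
          rw [if_pos rfl, if_pos rfl, List.count_cons_self]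
          push_cast
          omega
        · rw [if_neg hxc, if_neg hxc, add_zero]
          have hcx : ¬ c = x := fun hh => hxc hh.symm
          simp [hcx]
      rw [hsum, Finset.sum_ite_eq' Sf c (fun _ => (1:Int)), if_pos hc]
      ring
    · rw [if_neg h]
      rw [ih d ans (fun x hx => hsub x (List.mem_cons_of_mem c hx)) hpos]
      congr 1
      apply Finset.sum_congr rfl
      intro x _
      by_cases hxc : x = c
      · subst hxc
        have h0 : d.getD x 0 = 0 := by have := hpos x; omega
        rw [h0, List.count_cons_self]
        push_cast
        omega
      · have hcx : ¬ c = x := fun hh => hxc hh.symm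
        simp [hcx]

-- ===== VERDICT (by name: the statement is the Claim_ definition above) =====
theorem solution_spec : Claim_equal_solution := by
  intro s1 s2 _
  unfold Spec_solution solution solution_alt
  simp only [pvBuildA, PySem.Dict.keys_counter]
  rw [pvA_eq s1.toList s2.toList]
  have hb : List.foldl (fun d c => d.insert c (d.getD c 0 + 1)) PySem.Dict.empty s1.toList
      = PySem.Dict.counter s1.toList :=
    PySem.Dict.foldl_insert_getD_add_one_eq_counter s1.toList
  rw [hb]
  rw [pvB_loop s2.toList.toFinset s2.toList (PySem.Dict.counter s1.toList) 0
    (fun x hx => List.mem_toFinset.mpr hx)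
    (fun x => by rw [PySem.Dict.getD_counter]; exact Int.natCast_nonneg _), zero_add]
  have : ∀ x, min ((PySem.Dict.counter s1.toList).getD x 0) ((s2.toList.count x : Nat) : Int)
      = pvF s1.toList s2.toList x := by
    intro x; rw [PySem.Dict.getD_counter]; rfl
  rw [Finset.sum_congr rfl (fun x _ => this x)]
  exact pvSum_shift s1.toList s2.toList
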